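-- pv_equiv track=rewrite | github.com/countwitte/supreme-garbanzo | scraper.py | _extract_grade
-- ===== SOURCE A (Python) =====
-- def _extract_grade(text: str, grade_type: str) -> dict:
--     import re
--     lines = text.split('\n')
--
--     published = None
--     live = None
--
--     for i, line in enumerate(lines):
--         stripped = line.strip()
--         # Published is 2 lines after "Published" label
--         if stripped == 'Published' and i + 2 < len(lines):
--             try:
--                 val = int(lines[i + 2].strip())
--                 if 100 <= val <= 2500:
--                     published = val
--             except:
--                 pass
--         # Live is 2 lines after "Live" label
--         if stripped == 'Live' and i + 2 < len(lines):
--             try: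
--                 val = int(lines[i + 2].strip())
--                 if 100 <= val <= 2500:
--                     live = val
--             except:
--                 pass
--
--     return {"published": published, "live": live}
-- ===== SOURCE B (Python) =====
-- def _extract_grade(text: str, grade_type: str) -> dict:
--     # Pair each line with the line two below it; scan the pairs back-to-front
--     # and return the first valid value (= A's last-valid-wins), with early exit.
--     lines = text.split('\n')
--     pairs = list(zip(lines, lines[2:]))
--
--     def grab(label):
--         for a, b in reversed(pairs):
--             if a.strip() == label:
--                 try:
--                     v = int(b.strip())
--                 except:
--                     continue
--                 if 100 <= v <= 2500:
--                     return v
--         return None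
--
--     return {"published": grab('Published'), "live": grab('Live')}
-- ===== Notes on version B (the rewrite author's own statement) =====
-- stated objective: alternative
-- what changed: Instead of A's single forward indexed loop carrying two accumulators and bounds checks, B zips each line with the line two below it and, per label, scans the reversed pair list with an early return at the first valid value (= A's last-valid-wins), eliminating index arithmetic and accumulators.
import Mathlib
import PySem

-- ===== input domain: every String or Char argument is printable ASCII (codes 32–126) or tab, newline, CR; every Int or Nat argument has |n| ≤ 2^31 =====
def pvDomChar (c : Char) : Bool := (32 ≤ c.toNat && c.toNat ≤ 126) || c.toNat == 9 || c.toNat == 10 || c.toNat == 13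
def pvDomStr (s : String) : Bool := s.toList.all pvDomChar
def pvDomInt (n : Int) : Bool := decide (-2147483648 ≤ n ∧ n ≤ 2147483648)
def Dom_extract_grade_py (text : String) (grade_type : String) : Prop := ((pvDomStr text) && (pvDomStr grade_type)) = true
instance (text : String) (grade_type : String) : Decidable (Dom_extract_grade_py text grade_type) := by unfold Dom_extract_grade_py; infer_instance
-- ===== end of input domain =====

-- B pairs each line with the line two below it (zip) and scans the pairs back-to-front with an
-- early return, instead of A's forward indexed loop with two accumulators (alternative, same cost).

-- ===== PORT A =====
-- one iteration of A's loop: try the "Published" update on st.1, then the "Live" update on st1.2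
def extractGradeStepA (lines : List String) (st : Option Int × Option Int) (p : Int × String) :
    Option Int × Option Int :=
  let stripped := PySem.Str.strip p.2
  let st1 :=
    if stripped = "Published" ∧ p.1 + 2 < (lines.length : Int) then
      match PySem.Int.ofStr? (PySem.Str.strip (PySem.List.pyGetD lines (p.1 + 2) "")) with
      | some v => if 100 ≤ v ∧ v ≤ 2500 then (some v, st.2) else st
      | none => st
    else st
  if stripped = "Live" ∧ p.1 + 2 < (lines.length : Int) then
    match PySem.Int.ofStr? (PySem.Str.strip (PySem.List.pyGetD lines (p.1 + 2) "")) with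
    | some v => if 100 ≤ v ∧ v ≤ 2500 then (st1.1, some v) else st1
    | none => st1
  else st1

def extract_grade_py (text : String) (grade_type : String) : List (String × Option Int) :=
  let lines := (PySem.Str.split? text "\n").getD []
  let res := (PySem.List.enumerate lines 0).foldl (extractGradeStepA lines) (none, none)
  [("published", res.1), ("live", res.2)]

-- ===== PORT B =====
-- B's inner helper grab(label): walk the reversed pair list, return the first valid value
def extractGradeGrab (label : String) : List (String × String) → Option Int
  | [] => none
  | (a, b) :: rest =>
      if PySem.Str.strip a = label then
        match PySem.Int.ofStr? (PySem.Str.strip b) with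
        | some v => if 100 ≤ v ∧ v ≤ 2500 then some v else extractGradeGrab label rest
        | none => extractGradeGrab label rest
      else extractGradeGrab label rest

def extract_grade_py_alt (text : String) (grade_type : String) : List (String × Option Int) :=
  let lines := (PySem.Str.split? text "\n").getD []
  let pairs := lines.zip (PySem.List.slice lines (some 2) none)
  [("published", extractGradeGrab "Published" pairs.reverse),
   ("live", extractGradeGrab "Live" pairs.reverse)]

-- ===== PRECONDITION & SPEC =====
def Spec_extract_grade_py (text : String) (grade_type : String) (out : List (String × Option Int)) : Prop := out = extract_grade_py_alt text grade_type
instance (text : String) (grade_type : String) (out : List (String × Option Int)) : Decidable (Spec_extract_grade_py text grade_type out) := by unfold Spec_extract_grade_py; infer_instance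

-- ===== CLAIM (what is proved, stated in full; the proofs are below) =====
def Claim_equal_extract_grade_py : Prop := ∀ (text : String) (grade_type : String), Dom_extract_grade_py text grade_type → Spec_extract_grade_py text grade_type (extract_grade_py text grade_type)

-- ===== LEMMAS AND PROOFS =====

-- proof-side: one label's worth of A's step
def extractGradeStepB (lines : List String) (label : String) (acc : Option Int) (p : Int × String) :
    Option Int :=
  if PySem.Str.strip p.2 = label ∧ p.1 + 2 < (lines.length : Int) then
    match PySem.Int.ofStr? (PySem.Str.strip (PySem.List.pyGetD lines (p.1 + 2) "")) with
    | some v => if 100 ≤ v ∧ v ≤ 2500 then some v else acc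
    | none => acc
  else acc

-- proof-side: the same update expressed on a (line, line-two-below) pair
def extractGradeG (label : String) (acc : Option Int) (p : String × String) : Option Int :=
  if PySem.Str.strip p.1 = label then
    match PySem.Int.ofStr? (PySem.Str.strip p.2) with
    | some v => if 100 ≤ v ∧ v ≤ 2500 then some v else acc
    | none => acc
  else acc

lemma stepA_eq_pair (lines : List String) (st : Option Int × Option Int) (p : Int × String) :
    extractGradeStepA lines st p =
      (extractGradeStepB lines "Published" st.1 p, extractGradeStepB lines "Live" st.2 p) := by
  unfold extractGradeStepA extractGradeStepB
  by_cases hP : PySem.Str.strip p.2 = "Published" ∧ p.1 + 2 < (lines.length : Int) <;>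
  by_cases hL : PySem.Str.strip p.2 = "Live" ∧ p.1 + 2 < (lines.length : Int) <;>
  simp only [hP, hL, if_false]
  · exact absurd (hP.1.symm.trans hL.1) (by decide)
  all_goals cases PySem.Int.ofStr? (PySem.Str.strip (PySem.List.pyGetD lines (p.1 + 2) "")) with
    | none => simp
    | some v => by_cases hv : 100 ≤ v ∧ v ≤ 2500 <;> simp [hv]

lemma fold_pair (lines : List String) (es : List (Int × String)) (a b : Option Int) :
    es.foldl (extractGradeStepA lines) (a, b) =
      (es.foldl (extractGradeStepB lines "Published") a,
       es.foldl (extractGradeStepB lines "Live") b) := by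
  induction es generalizing a b with
  | nil => rfl
  | cons e es ih =>
      simp only [List.foldl_cons, stepA_eq_pair]
      exact ih _ _

-- A's indexed fold over a suffix equals the pairwise fold over the zipped suffixes
lemma enum_zip (L : List String) (label : String) :
    ∀ (d : List String) (k : ℕ) (acc : Option Int), L.drop k = d →
      (PySem.List.enumerate d (k : Int)).foldl (extractGradeStepB L label) acc
        = (d.zip (L.drop (k + 2))).foldl (extractGradeG label) acc := by
  intro d
  induction d with
  | nil => intro k acc _; rfl
  | cons a d' ih =>
      intro k acc h
      have hd' : L.drop (k + 1) = d' := by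
        rw [← List.drop_drop, h]; rfl
      have hlen : k + 1 ≤ L.length := by
        have := congrArg List.length h
        simp [List.length_drop] at this; omega
      have hcast : ((k : Int) + 1) = (((k + 1 : ℕ)) : Int) := by push_cast; ring
      rw [PySem.List.enumerate_cons, List.foldl_cons, hcast]
      cases h2 : L.drop (k + 2) with
      | nil =>
          have hlen2 : L.length ≤ k + 2 := by
            have := congrArg List.length h2
            simp [List.length_drop] at this; omega
          have hcond : ¬ ((k : Int) + 2 < (L.length : Int)) := by
            omega
          have hstep : extractGradeStepB L label acc ((k : Int), a) = acc := by
            unfold extractGradeStepB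
            rw [if_neg (fun hh => hcond hh.2)]
          have h3 : L.drop (k + 1 + 2) = [] := by
            apply List.drop_eq_nil_of_le; omega
          rw [hstep, ih (k + 1) acc hd', h3]
          simp [List.zip_nil_right]
      | cons c rest =>
          have hlen2 : k + 2 < L.length := by
            have := congrArg List.length h2
            simp [List.length_drop] at this; omega
          have hcond : ((k : Int) + 2 < (L.length : Int)) := by omega
          have hget : PySem.List.pyGetD L ((k : Int) + 2) "" = c := by
            have hc : ((k : Int) + 2) = ((k + 2 : ℕ) : Int) := by push_cast; ring
            rw [hc, PySem.List.pyGetD_natCast]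
            have hg : L[k + 2]? = some c := by
              rw [← List.head?_drop, h2]; rfl
            simp [List.getD, hg]
          have hstep : extractGradeStepB L label acc ((k : Int), a)
              = extractGradeG label acc (a, c) := by
            unfold extractGradeStepB extractGradeG
            rw [hget]
            by_cases ha : PySem.Str.strip a = label
            · rw [if_pos (And.intro ha hcond), if_pos ha]
            · rw [if_neg (fun hh => ha hh.1), if_neg ha]
          have h3 : L.drop (k + 1 + 2) = rest := by
            have h4 := congrArg (List.drop 1) h2
            rw [List.drop_drop] at h4
            simpa [show k + 2 + 1 = k + 1 + 2 from by omega] using h4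
          rw [hstep, ih (k + 1) _ hd', h3, List.zip_cons_cons, List.foldl_cons]

-- one-step unfolding of B's helper (definitional)
lemma grab_cons (label a b : String) (rest : List (String × String)) :
    extractGradeGrab label ((a, b) :: rest)
      = (if PySem.Str.strip a = label then
          match PySem.Int.ofStr? (PySem.Str.strip b) with
          | some v => if 100 ≤ v ∧ v ≤ 2500 then some v else extractGradeGrab label rest
          | none => extractGradeGrab label rest
        else extractGradeGrab label rest) := rfl

lemma grab_append (label : String) (l m : List (String × String)) :
    extractGradeGrab label (l ++ m)
      = match extractGradeGrab label l with
        | some v => some v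
        | none => extractGradeGrab label m := by
  induction l with
  | nil => simp [extractGradeGrab]
  | cons p l ih =>
      obtain ⟨a, b⟩ := p
      rw [List.cons_append, grab_cons, grab_cons]
      by_cases ha : PySem.Str.strip a = label
      · rw [if_pos ha, if_pos ha]
        cases PySem.Int.ofStr? (PySem.Str.strip b) with
        | none => exact ih
        | some v =>
            by_cases hv : 100 ≤ v ∧ v ≤ 2500
            · simp only [hv, and_self, if_true]
            · simp only [hv, if_false]; exact ih
      · rw [if_neg ha, if_neg ha]; exact ih

-- last-valid-wins fold = first-valid on the reversed list
lemma fold_eq_grab (label : String) (ps : List (String × String)) (acc : Option Int) :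
    ps.foldl (extractGradeG label) acc
      = match extractGradeGrab label ps.reverse with
        | some v => some v
        | none => acc := by
  induction ps generalizing acc with
  | nil => rfl
  | cons p ps ih =>
      rw [List.foldl_cons, ih, List.reverse_cons, grab_append]
      cases extractGradeGrab label ps.reverse with
      | some v => rfl
      | none =>
          obtain ⟨a, b⟩ := p
          rw [grab_cons]
          unfold extractGradeG
          by_cases ha : PySem.Str.strip a = label
          · rw [if_pos ha, if_pos ha]
            cases PySem.Int.ofStr? (PySem.Str.strip b) with
            | none => rfl
            | some v =>
                by_cases hv : 100 ≤ v ∧ v ≤ 2500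
                · simp only [hv, and_self, if_true]
                · simp only [hv, if_false]; rfl
          · rw [if_neg ha, if_neg ha]; rfl

lemma per_label (lines : List String) (label : String) :
    (PySem.List.enumerate lines 0).foldl (extractGradeStepB lines label) none
      = extractGradeGrab label (lines.zip (PySem.List.slice lines (some 2) none)).reverse := by
  have h0 : (0 : Int) = ((0 : ℕ) : Int) := rfl
  rw [h0, enum_zip lines label lines 0 none (by simp), fold_eq_grab]
  have hsl : PySem.List.slice lines (some 2) none = lines.drop 2 := by
    have := PySem.List.slice_from lines (a := 2) (by norm_num)
    simpa using this
  rw [hsl]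
  cases extractGradeGrab label (lines.zip (lines.drop (0 + 2))).reverse <;> rfl

-- ===== VERDICT (by name: the statement is the Claim_ definition above) =====
theorem extract_grade_py_spec : Claim_equal_extract_grade_py := by
  intro text grade_type _
  unfold Spec_extract_grade_py extract_grade_py extract_grade_py_alt
  simp only [fold_pair, per_label]
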